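-- pv_equiv track=rewrite | github.com/songwookun/used-deal-analyzer | app/services/search_analyzer.py | compute_price_stats
-- ===== SOURCE A (Python) =====
-- def compute_price_stats(items: list[dict]) -> dict:
--     prices = [it["price"] for it in items if it.get("price", 0) > 0]
--     if not prices:
--         return {"count": 0}
--     sorted_p = sorted(prices)
--     median = sorted_p[len(sorted_p) // 2]
--     return {
--         "count": len(prices),
--         "min": sorted_p[0],
--         "max": sorted_p[-1],
--         "median": median,
--     }
-- ===== SOURCE B (Python) =====
-- def _select(xs, k):
--     # iterative quickselect (middle pivot): k-th smallest of xs, 0 <= k < len(xs)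
--     while True:
--         p = xs[len(xs) // 2]
--         lows = [x for x in xs if x < p]
--         if k < len(lows):
--             xs = lows
--             continue
--         eq = sum(1 for x in xs if x == p)
--         if k < len(lows) + eq:
--             return p
--         k -= len(lows) + eq
--         xs = [x for x in xs if x > p]
--
--
-- def compute_price_stats(items: list[dict]) -> dict:
--     prices = []
--     lo = hi = None
--     for it in items:
--         p = it.get("price", 0)
--         if p > 0:
--             prices.append(p)
--             if lo is None or p < lo:
--                 lo = p
--             if hi is None or p > hi:
--                 hi = p
--     n = len(prices)
--     if n == 0:
--         return {"count": 0}
--     return {"count": n, "min": lo, "max": hi, "median": _select(prices, n // 2)}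
-- ===== Notes on version B (the rewrite author's own statement) =====
-- stated objective: alternative
-- what changed: Replaces sort-then-index with a single accumulating pass for count/min/max and an iterative quickselect (middle pivot) for the median, so no sorted copy is ever built.
import Mathlib
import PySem

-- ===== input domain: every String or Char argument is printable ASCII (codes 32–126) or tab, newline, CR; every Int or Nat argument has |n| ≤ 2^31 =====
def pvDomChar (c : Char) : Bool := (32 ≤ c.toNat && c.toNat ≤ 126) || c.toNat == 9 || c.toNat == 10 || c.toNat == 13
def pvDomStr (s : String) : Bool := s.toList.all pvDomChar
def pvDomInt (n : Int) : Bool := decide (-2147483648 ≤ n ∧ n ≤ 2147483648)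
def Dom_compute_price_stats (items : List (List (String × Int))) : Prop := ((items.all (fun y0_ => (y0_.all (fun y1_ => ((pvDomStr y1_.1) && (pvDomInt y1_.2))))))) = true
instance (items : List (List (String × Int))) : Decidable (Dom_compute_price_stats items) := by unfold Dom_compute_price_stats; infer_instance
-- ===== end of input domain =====

-- B replaces A's sort-then-index by one accumulating pass for count/min/max plus an
-- in-place quickselect for the median (objective: alternative algorithm, no sort).

-- ===== PORT A =====
-- it["price"] is transliterated as getD _ "price" 0: the comprehension's guard
-- 'it.get("price", 0) > 0' guarantees the key is present there, so no KeyError occurs.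
def compute_price_stats (items : List (List (String × Int))) : List (String × Int) :=
  let prices := (items.filter (fun it => 0 < PySem.Dict.getD (PySem.Dict.mk it) "price" 0)).map
      (fun it => PySem.Dict.getD (PySem.Dict.mk it) "price" 0)
  if prices = [] then [("count", 0)]
  else
    let sorted_p := PySem.List.sorted prices (fun x => x) false
    let median := (PySem.List.pyGet? sorted_p ((sorted_p.length / 2 : Nat) : Int)).getD 0
    [("count", (prices.length : Int)),
     ("min", (PySem.List.pyGet? sorted_p 0).getD 0),
     ("max", (PySem.List.pyGet? sorted_p (-1)).getD 0),
     ("median", median)]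

-- ===== PORT B =====
-- pvSelect: Source B's iterative quickselect loop; the fuel (initially len(xs), enough for
-- every iteration since the list shrinks) only makes the loop structurally recursive.
def pvSelectFuel : Nat → List Int → Nat → Int
  | 0, _, _ => 0
  | _ + 1, [], _ => 0  -- unreachable: the loop is only entered with 0 ≤ k < len(xs)
  | fuel + 1, a :: t, k =>
    let p := (a :: t).getD ((a :: t).length / 2) 0
    let lows := (a :: t).filter (fun x => x < p)
    if k < lows.length then pvSelectFuel fuel lows k
    else
      let eq := ((a :: t).filter (fun x => x = p)).length
      if k < lows.length + eq then p
      else pvSelectFuel fuel ((a :: t).filter (fun x => p < x)) (k - (lows.length + eq))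

def pvSelect (xs : List Int) (k : Nat) : Int :=
  pvSelectFuel xs.length xs k

-- one pass over items: (prices, running min, running max)
def pvScanStep (st : List Int × Option Int × Option Int) (it : List (String × Int)) :
    List Int × Option Int × Option Int :=
  let p := PySem.Dict.getD (PySem.Dict.mk it) "price" 0
  if 0 < p then
    (st.1 ++ [p],
     (match st.2.1 with | none => some p | some l => if p < l then some p else some l),
     (match st.2.2 with | none => some p | some h => if h < p then some p else some h))
  else st

def compute_price_stats_alt (items : List (List (String × Int))) : List (String × Int) :=
  let st := items.foldl pvScanStep ([], none, none)
  let n := st.1.length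
  if n = 0 then [("count", 0)]
  else
    [("count", (n : Int)),
     ("min", st.2.1.getD 0),
     ("max", st.2.2.getD 0),
     ("median", pvSelect st.1 (n / 2))]

-- ===== PRECONDITION & SPEC =====
def Spec_compute_price_stats (items : List (List (String × Int))) (out : List (String × Int)) : Prop := out = compute_price_stats_alt items
instance (items : List (List (String × Int))) (out : List (String × Int)) : Decidable (Spec_compute_price_stats items out) := by unfold Spec_compute_price_stats; infer_instance

-- ===== CLAIM (what is proved, stated in full; the proofs are below) =====
def Claim_equal_compute_price_stats : Prop := ∀ (items : List (List (String × Int))), Dom_compute_price_stats items → Spec_compute_price_stats items (compute_price_stats items)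

-- ===== LEMMAS AND PROOFS =====

-- B's fold, characterised: prices list, running min, running max over the extracted prices
def pvPrices (items : List (List (String × Int))) : List Int :=
  (items.filter (fun it => 0 < PySem.Dict.getD (PySem.Dict.mk it) "price" 0)).map
    (fun it => PySem.Dict.getD (PySem.Dict.mk it) "price" 0)

lemma pvScan_char (items : List (List (String × Int)))
    (ps : List Int) (lo hi : Option Int) :
    items.foldl pvScanStep (ps, lo, hi) =
      ((ps ++ pvPrices items),
       (pvPrices items).foldl (fun a p => match a with
          | none => some p | some l => if p < l then some p else some l) lo,
       (pvPrices items).foldl (fun a p => match a with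
          | none => some p | some h => if h < p then some p else some h) hi) := by
  induction items generalizing ps lo hi with
  | nil => simp [pvPrices]
  | cons it rest ih =>
    simp only [List.foldl_cons, pvScanStep, pvPrices, List.filter_cons]
    by_cases h : 0 < PySem.Dict.getD (PySem.Dict.mk it) "price" 0
    · simp [h, ih, pvPrices]
    · simp [h, ih, pvPrices]

lemma pvFoldMin_some (t : List Int) (a : Int) :
    t.foldl (fun a p => match a with
        | none => some p | some l => if p < l then some p else some l) (some a)
      = some (t.foldl min a) := by
  induction t generalizing a with
  | nil => rfl
  | cons x t ih =>
    simp only [List.foldl_cons]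
    show t.foldl _ (if x < a then some x else some a) = some (t.foldl min (min a x))
    split_ifs with h
    · rw [ih, min_eq_right h.le]
    · rw [ih, min_eq_left (by omega)]

lemma pvFoldMax_some (t : List Int) (a : Int) :
    t.foldl (fun a p => match a with
        | none => some p | some h => if h < p then some p else some h) (some a)
      = some (t.foldl max a) := by
  induction t generalizing a with
  | nil => rfl
  | cons x t ih =>
    simp only [List.foldl_cons]
    show t.foldl _ (if a < x then some x else some a) = some (t.foldl max (max a x))
    split_ifs with h
    · rw [ih, max_eq_right h.le]
    · rw [ih, max_eq_left (by omega)]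

-- the sorted list splits at any pivot p ∈ xs into lows ++ equals ++ highs
lemma pvSorted_split (xs : List Int) (p : Int) :
    PySem.List.sorted xs (fun x => x) false =
      PySem.List.sorted (xs.filter (fun x => x < p)) (fun x => x) false
        ++ xs.filter (fun x => x = p)
        ++ PySem.List.sorted (xs.filter (fun x => p < x)) (fun x => x) false := by
  apply PySem.List.sorted_id_eq_of_perm_of_pairwise
  · -- permutation with xs
    have h1 : (xs.filter (fun x => decide (x < p)) ++ xs.filter (fun x => !decide (x < p))).Perm xs :=
      List.filter_append_perm _ xs
    have h2 : ((xs.filter (fun x => !decide (x < p))).filter (fun x => decide (x = p))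
        ++ (xs.filter (fun x => !decide (x < p))).filter (fun x => !decide (x = p))).Perm
        (xs.filter (fun x => !decide (x < p))) :=
      List.filter_append_perm _ _
    have e1 : (xs.filter (fun x => !decide (x < p))).filter (fun x => decide (x = p))
        = xs.filter (fun x => decide (x = p)) := by
      rw [List.filter_filter]
      apply List.filter_congr
      intro x _
      by_cases h : x = p <;> by_cases h' : x < p <;> simp [h, h']
    have e2 : (xs.filter (fun x => !decide (x < p))).filter (fun x => !decide (x = p))
        = xs.filter (fun x => decide (p < x)) := by
      rw [List.filter_filter]
      apply List.filter_congr
      intro x _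
      by_cases h : x = p <;> by_cases h' : x < p <;> simp [h, h'] <;> omega
    rw [e1, e2] at h2
    refine List.Perm.trans
      (((PySem.List.sorted_perm _ _ _).append (List.Perm.refl _)).append
        (PySem.List.sorted_perm _ _ _)) ?_
    rw [List.append_assoc]
    exact List.Perm.trans (List.Perm.append_left _ h2) h1
  · -- the concatenation is ordered
    have hmemS : ∀ (l : List Int) (x : Int),
        x ∈ PySem.List.sorted l (fun y => y) false → x ∈ l :=
      fun l x hx => (PySem.List.mem_sorted _ _ _ _).mp hx
    refine List.pairwise_append.mpr ⟨List.pairwise_append.mpr ⟨?_, ?_, ?_⟩, ?_, ?_⟩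
    · exact PySem.List.sorted_pairwise _ _
    · exact List.pairwise_of_forall_mem_list (fun a ha b hb => by
        simp only [List.mem_filter, decide_eq_true_eq] at ha hb; omega)
    · intro a ha b hb
      have ha' := hmemS _ _ ha
      simp only [List.mem_filter, decide_eq_true_eq] at ha' hb
      omega
    · exact PySem.List.sorted_pairwise _ _
    · intro a ha b hb
      have hb' := hmemS _ _ hb
      rcases List.mem_append.mp ha with h | h
      · have ha' := hmemS _ _ h
        simp only [List.mem_filter, decide_eq_true_eq] at ha' hb'
        omega
      · simp only [List.mem_filter, decide_eq_true_eq] at h hb'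
        omega

-- quickselect computes the k-th element of the sorted list
lemma pvSelectFuel_eq_sorted (fuel : Nat) :
    ∀ (xs : List Int) (k : Nat), xs.length ≤ fuel → k < xs.length →
      pvSelectFuel fuel xs k = (PySem.List.sorted xs (fun x => x) false).getD k 0 := by
  induction fuel with
  | zero => intro xs k h hk; omega
  | succ fuel ih =>
    intro xs k h hk
    match xs with
    | a :: t =>
    rw [pvSelectFuel]
    set p : Int := (a :: t).getD ((a :: t).length / 2) 0 with hp
    set lows : List Int := (a :: t).filter (fun x => x < p) with hl
    set eqs : List Int := (a :: t).filter (fun x => x = p) with he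
    set highs : List Int := (a :: t).filter (fun x => p < x) with hh
    show (if k < lows.length then pvSelectFuel fuel lows k
          else if k < lows.length + eqs.length then p
          else pvSelectFuel fuel highs (k - (lows.length + eqs.length)))
        = (PySem.List.sorted (a :: t) (fun x => x) false).getD k 0
    have hsplit : PySem.List.sorted (a :: t) (fun x => x) false
        = PySem.List.sorted lows (fun x => x) false ++ eqs
            ++ PySem.List.sorted highs (fun x => x) false := by
      rw [hl, he, hh]; exact pvSorted_split (a :: t) p
    have hmem : p ∈ (a :: t) := by
      rw [hp, List.getD_eq_getElem (a :: t) 0 (by simp; omega)]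
      exact List.getElem_mem _
    have hllen : lows.length < (a :: t).length := by
      rw [hl]
      exact List.length_filter_lt_length_iff_exists.mpr ⟨p, hmem, by simp⟩
    have hhlen : highs.length < (a :: t).length := by
      rw [hh]
      exact List.length_filter_lt_length_iff_exists.mpr ⟨p, hmem, by simp⟩
    have hperm : lows.length + eqs.length + highs.length = (a :: t).length := by
      have := congrArg List.length hsplit
      simp only [List.length_append, PySem.List.length_sorted] at this
      omega
    by_cases h1 : k < lows.length
    · rw [if_pos h1]
      rw [ih lows k (by omega) h1, hsplit]
      rw [List.getD_eq_getElem?_getD, List.getD_eq_getElem?_getD]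
      rw [List.getElem?_append_left (by simp [PySem.List.length_sorted]; omega),
        List.getElem?_append_left (by simp [PySem.List.length_sorted]; omega)]
    · rw [if_neg h1]
      by_cases h2 : k < lows.length + eqs.length
      · rw [if_pos h2]
        rw [hsplit, List.getD_eq_getElem?_getD]
        rw [List.getElem?_append_left (by simp [PySem.List.length_sorted]; omega)]
        rw [List.getElem?_append_right (by simp [PySem.List.length_sorted]; omega)]
        have hkl : k - (PySem.List.sorted lows (fun x => x) false).length < eqs.length := by
          simp only [PySem.List.length_sorted]; omega
        rw [List.getElem?_eq_getElem hkl]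
        have hin : eqs[k - (PySem.List.sorted lows (fun x => x) false).length] ∈ eqs :=
          List.getElem_mem _
        have hall : ∀ x ∈ eqs, x = p := by
          rw [he]
          intro x hx
          simp only [List.mem_filter, decide_eq_true_eq] at hx
          exact hx.2
        rw [Option.getD_some]
        exact (hall _ hin).symm
      · rw [if_neg h2]
        have hk' : k - (lows.length + eqs.length) < highs.length := by omega
        rw [ih highs _ (by omega) hk', hsplit]
        rw [List.getD_eq_getElem?_getD, List.getD_eq_getElem?_getD]
        rw [List.getElem?_append_right (by simp [PySem.List.length_sorted]; omega)]
        congr 1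
        simp only [List.length_append, PySem.List.length_sorted]

lemma pvSelect_eq_sorted (xs : List Int) (k : Nat) (hk : k < xs.length) :
    pvSelect xs k = (PySem.List.sorted xs (fun x => x) false).getD k 0 :=
  pvSelectFuel_eq_sorted xs.length xs k le_rfl hk

-- the running min over a nonempty list is the head of its sorted version
lemma pvMin_eq_sorted_head (a : Int) (t : List Int) :
    t.foldl min a = (PySem.List.sorted (a :: t) (fun x => x) false).getD 0 0 := by
  have hmin : PySem.List.min? (a :: t) (fun x => x) = some (t.foldl min a) :=
    PySem.List.min?_id_cons a t
  obtain ⟨m, tl, hst⟩ : ∃ m tl, PySem.List.sorted (a :: t) (fun x => x) false = m :: tl := by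
    rcases h : PySem.List.sorted (a :: t) (fun x => x) false with _ | ⟨m, tl⟩
    · have hlen := PySem.List.length_sorted (a :: t) (fun x => x) false
      rw [h] at hlen
      simp at hlen
    · exact ⟨m, tl, rfl⟩
  rw [hst]
  have hmem : m ∈ (a :: t) := (PySem.List.mem_sorted _ _ _ _).mp (hst ▸ List.mem_cons_self)
  have h1 : ∀ y ∈ (a :: t), m ≤ y := PySem.List.key_head_sorted_le _ _ hst
  have h2 : ∀ y ∈ (a :: t), t.foldl min a ≤ y := PySem.List.min?_isMin hmin
  have h3 : t.foldl min a ∈ (a :: t) := PySem.List.min?_mem hmin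
  simp only [List.getD_cons_zero]
  exact le_antisymm (h2 m hmem) (h1 _ h3)

-- the running max over a nonempty list is the last of its sorted version
lemma pvMax_eq_sorted_last (a : Int) (t : List Int) :
    some (t.foldl max a) = (PySem.List.sorted (a :: t) (fun x => x) false).getLast? := by
  have hmax : PySem.List.max? (a :: t) (fun x => x) = some (t.foldl max a) :=
    PySem.List.max?_id_cons a t
  have hlen : (PySem.List.sorted (a :: t) (fun x => x) false).length = (a :: t).length :=
    PySem.List.length_sorted _ _ _
  have hpos : 0 < (PySem.List.sorted (a :: t) (fun x => x) false).length := by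
    rw [hlen]; simp
  rw [List.getLast?_eq_getElem?, List.getElem?_eq_getElem (by omega)]
  have hmem : (PySem.List.sorted (a :: t) (fun x => x) false)[(PySem.List.sorted (a :: t) (fun x => x) false).length - 1] ∈ (a :: t) :=
    (PySem.List.mem_sorted _ _ _ _).mp (List.getElem_mem _)
  have hge : ∀ y ∈ (a :: t),
      y ≤ (PySem.List.sorted (a :: t) (fun x => x) false)[(PySem.List.sorted (a :: t) (fun x => x) false).length - 1] := by
    intro y hy
    obtain ⟨i, hi, hiy⟩ :=
      List.getElem_of_mem ((PySem.List.mem_sorted (a :: t) (fun x => x) false y).mpr hy)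
    rw [← hiy]
    have hpw : (PySem.List.sorted (a :: t) (fun x => x) false).Pairwise (· ≤ ·) := by
      simpa using PySem.List.sorted_pairwise (a :: t) (fun x : Int => x)
    by_cases hilast : i = (PySem.List.sorted (a :: t) (fun x => x) false).length - 1
    · subst hilast
      exact le_refl _
    · exact List.pairwise_iff_getElem.mp hpw i _ hi (by omega) (by omega)
  have h2 : ∀ y ∈ (a :: t), y ≤ t.foldl max a := PySem.List.max?_isMax hmax
  have h3 : t.foldl max a ∈ (a :: t) := PySem.List.max?_mem hmax
  exact congrArg some (le_antisymm (hge _ h3) (h2 _ hmem))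

-- reduce B's running min/max folds over a nonempty list
lemma pvFoldMin_none (a : Int) (t : List Int) :
    (a :: t).foldl (fun a p => match a with
        | none => some p | some l => if p < l then some p else some l) none
      = some (t.foldl min a) := by
  simp only [List.foldl_cons]
  exact pvFoldMin_some t a

lemma pvFoldMax_none (a : Int) (t : List Int) :
    (a :: t).foldl (fun a p => match a with
        | none => some p | some h => if h < p then some p else some h) none
      = some (t.foldl max a) := by
  simp only [List.foldl_cons]
  exact pvFoldMax_some t a

-- ===== VERDICT (by name: the statement is the Claim_ definition above) =====
theorem compute_price_stats_spec : Claim_equal_compute_price_stats := by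
  intro items _
  unfold Spec_compute_price_stats compute_price_stats compute_price_stats_alt
  have hscan := pvScan_char items [] none none
  simp only [List.nil_append] at hscan
  rw [hscan]
  have hAP : ((items.filter (fun it => 0 < PySem.Dict.getD (PySem.Dict.mk it) "price" 0)).map
      (fun it => PySem.Dict.getD (PySem.Dict.mk it) "price" 0)) = pvPrices items := rfl
  rw [hAP]
  rcases hps : pvPrices items with _ | ⟨a, t⟩
  · simp
  · have hlenS : (PySem.List.sorted (a :: t) (fun x => x) false).length = t.length + 1 := by
      rw [PySem.List.length_sorted]; rfl
    have hS0 : 0 < (PySem.List.sorted (a :: t) (fun x => x) false).length := by omega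
    have hmin : (PySem.List.pyGet? (PySem.List.sorted (a :: t) (fun x => x) false) 0).getD 0
        = t.foldl min a := by
      rw [show (0 : Int) = ((0 : Nat) : Int) from rfl, PySem.List.pyGet?_natCast,
        List.getElem?_eq_getElem hS0, Option.getD_some, ← List.getD_eq_getElem _ 0 hS0]
      exact (pvMin_eq_sorted_head a t).symm
    have hmax : (PySem.List.pyGet? (PySem.List.sorted (a :: t) (fun x => x) false) (-1)).getD 0
        = t.foldl max a := by
      rw [PySem.List.pyGet?_neg_one, List.getLast?_eq_getElem?,
        ← List.getLast?_eq_getElem?, ← pvMax_eq_sorted_last]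
      rfl
    have hmed : pvSelect (a :: t) ((a :: t).length / 2)
        = (PySem.List.pyGet? (PySem.List.sorted (a :: t) (fun x => x) false)
            (((PySem.List.sorted (a :: t) (fun x => x) false).length / 2 : Nat) : Int)).getD 0 := by
      rw [PySem.List.pyGet?_natCast,
        pvSelect_eq_sorted (a :: t) ((a :: t).length / 2) (by simp; omega),
        List.getD_eq_getElem?_getD]
      congr 2
      rw [hlenS]
      rfl
    have hc1 : ¬(a :: t) = [] := by simp
    have hc2 : ¬(a :: t).length = 0 := by simp
    simp only [if_neg hc1, if_neg hc2, pvFoldMin_none, pvFoldMax_none, Option.getD_some]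
    rw [hmin, hmax, hmed]
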